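-- pv_equiv track=rewrite | github.com/hcodyd/reversi | ReversiAI/AIGuy.py | hypo_check_dir
-- ===== SOURCE A (Python) =====
-- def hypo_check_dir(row, col, dir_x, dir_y, me, board):
--     """
--     Figures out if the move at row, col is valid for the given player in the given direction.
--     :param row: the row of the unoccupied square (int)
--     :param col: the col of the unoccupied square (int)
--     :param dir_x: the x direction
--     :param dir_y: the y direction
--     :param me: the given player
--     :param board: the hypothetical board
--     :return: True or False
--     """
--     sequence = []
--     for i in range(1, 8):
--         r = row + dir_y * i
--         c = col + dir_x * i
--         if (r < 0) or (r > 7) or (c < 0) or (c > 7):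
--             break
--         sequence.append(board[r, c])
--
--     count = 0
--     for i in range(len(sequence)):
--         if me == 1:
--             if sequence[i] == 2:
--                 count = count + 1
--             else:
--                 if (sequence[i] == 1) and (count > 0):
--                     return True
--                 break
--         else:
--             if sequence[i] == 1:
--                 count = count + 1
--             else:
--                 if (sequence[i] == 2) and (count > 0):
--                     return True
--                 break
--
--     return False
-- ===== SOURCE B (Python) =====
-- def hypo_check_dir(row, col, dir_x, dir_y, me, board):
--     opp = 2 if me == 1 else 1
--     own = 1 if me == 1 else 2
--     count = 0
--     for i in range(1, 8):
--         r = row + dir_y * i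
--         c = col + dir_x * i
--         if r < 0 or r > 7 or c < 0 or c > 7:
--             break
--         cell = board[r, c]
--         if cell == opp:
--             count += 1
--         elif cell == own and count > 0:
--             return True
--         else:
--             break
--     return False
-- ===== Notes on version B (the rewrite author's own statement) =====
-- stated objective: simpler
-- what changed: B fuses A's two sequential loops (build cell list, then scan it) into one outward scan with precomputed opponent/own colors, dropping the intermediate list and the per-cell me-branching.
import Mathlib
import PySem

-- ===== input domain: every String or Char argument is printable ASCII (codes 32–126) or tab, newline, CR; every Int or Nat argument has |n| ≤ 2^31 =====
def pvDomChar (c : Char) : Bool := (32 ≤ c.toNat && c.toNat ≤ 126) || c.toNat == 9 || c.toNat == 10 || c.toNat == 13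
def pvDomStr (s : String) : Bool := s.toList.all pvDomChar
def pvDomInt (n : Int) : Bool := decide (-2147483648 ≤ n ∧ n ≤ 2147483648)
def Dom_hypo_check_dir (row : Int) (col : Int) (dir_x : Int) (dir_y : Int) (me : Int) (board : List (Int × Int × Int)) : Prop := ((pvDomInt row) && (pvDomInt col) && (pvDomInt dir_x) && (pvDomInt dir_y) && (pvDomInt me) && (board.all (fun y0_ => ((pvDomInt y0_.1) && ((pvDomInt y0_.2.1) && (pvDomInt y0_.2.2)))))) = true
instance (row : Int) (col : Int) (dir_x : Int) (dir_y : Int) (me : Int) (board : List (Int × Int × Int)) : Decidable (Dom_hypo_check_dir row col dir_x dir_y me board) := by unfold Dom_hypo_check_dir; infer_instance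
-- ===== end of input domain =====

-- B fuses A's two loops (build the ray's cell list, then scan it) into one outward scan with
-- precomputed opponent/own colors; same result, no intermediate list (objective: simpler).


-- board[r, c]: first-match lookup in the association list (dict keys are unique);
-- none = KeyError (excluded by Pre_).
def pvCell? (board : List (Int × Int × Int)) (r c : Int) : Option Int :=
  (board.find? (fun t => t.1 == r && t.2.1 == c)).map (·.2.2)

-- lookup with default 0; exact wherever Pre_ guarantees the key is present
def pvCellD (board : List (Int × Int × Int)) (r c : Int) : Int :=
  (pvCell? board r c).getD 0

-- ===== PORT A =====
-- first loop: build `sequence` for i = 1..7, breaking at the first out-of-bounds square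
def pvSeqA (row col dir_x dir_y : Int) (board : List (Int × Int × Int)) : Nat → Int → List Int
  | 0, _ => []
  | k + 1, i =>
    let r := row + dir_y * i
    let c := col + dir_x * i
    if r < 0 ∨ r > 7 ∨ c < 0 ∨ c > 7 then []
    else pvCellD board r c :: pvSeqA row col dir_x dir_y board k (i + 1)

-- second loop: scan `sequence` with the running count, branching on `me` per cell
def pvScanA (me : Int) : List Int → Int → Bool
  | [], _ => false
  | s :: rest, count =>
    if me = 1 then
      if s = 2 then pvScanA me rest (count + 1)
      else decide (s = 1 ∧ count > 0)
    else
      if s = 1 then pvScanA me rest (count + 1)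
      else decide (s = 2 ∧ count > 0)

def hypo_check_dir (row : Int) (col : Int) (dir_x : Int) (dir_y : Int) (me : Int) (board : List (Int × Int × Int)) : Bool :=
  pvScanA me (pvSeqA row col dir_x dir_y board 7 1) 0

-- ===== PORT B =====
-- single outward scan, i = 1..7 (k = remaining steps), with precomputed opp/own
def pvScanB (opp own row col dir_x dir_y : Int) (board : List (Int × Int × Int)) : Nat → Int → Int → Bool
  | 0, _, _ => false
  | k + 1, i, count =>
    let r := row + dir_y * i
    let c := col + dir_x * i
    if r < 0 ∨ r > 7 ∨ c < 0 ∨ c > 7 then false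
    else
      let cell := pvCellD board r c
      if cell = opp then pvScanB opp own row col dir_x dir_y board k (i + 1) (count + 1)
      else if cell = own ∧ count > 0 then true
      else false

def hypo_check_dir_alt (row : Int) (col : Int) (dir_x : Int) (dir_y : Int) (me : Int) (board : List (Int × Int × Int)) : Bool :=
  let opp : Int := if me = 1 then 2 else 1
  let own : Int := if me = 1 then 1 else 2
  pvScanB opp own row col dir_x dir_y board 7 1 0

-- ===== PRECONDITION & SPEC =====
-- Pre_ excludes exactly the inputs where Python A raises KeyError: some square of the
-- in-bounds prefix of the ray (the squares A's first loop reads) is missing from the dict.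
def Pre_hypo_check_dir (row : Int) (col : Int) (dir_x : Int) (dir_y : Int) (me : Int) (board : List (Int × Int × Int)) : Prop :=
  ∀ i ∈ List.range' 1 7,
    (∀ j ∈ List.range' 1 7, j ≤ i →
      ¬ (row + dir_y * (j : Int) < 0 ∨ row + dir_y * (j : Int) > 7 ∨
         col + dir_x * (j : Int) < 0 ∨ col + dir_x * (j : Int) > 7)) →
    (pvCell? board (row + dir_y * (i : Int)) (col + dir_x * (i : Int))).isSome = true

instance (row : Int) (col : Int) (dir_x : Int) (dir_y : Int) (me : Int) (board : List (Int × Int × Int)) : Decidable (Pre_hypo_check_dir row col dir_x dir_y me board) := by unfold Pre_hypo_check_dir; infer_instance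

def pvWitness_hypo_check_dir : Int × Int × Int × Int × Int × (List (Int × Int × Int)) :=
  (3, 3, 1, 0, 1, [(3, 4, 2), (3, 5, 1), (3, 6, 0), (3, 7, 0)])

def Spec_hypo_check_dir (row : Int) (col : Int) (dir_x : Int) (dir_y : Int) (me : Int) (board : List (Int × Int × Int)) (out : Bool) : Prop := out = hypo_check_dir_alt row col dir_x dir_y me board
instance (row : Int) (col : Int) (dir_x : Int) (dir_y : Int) (me : Int) (board : List (Int × Int × Int)) (out : Bool) : Decidable (Spec_hypo_check_dir row col dir_x dir_y me board out) := by unfold Spec_hypo_check_dir; infer_instance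

-- ===== CLAIM (what is proved, stated in full; the proofs are below) =====
def Claim_equal_hypo_check_dir : Prop := ∀ (row : Int) (col : Int) (dir_x : Int) (dir_y : Int) (me : Int) (board : List (Int × Int × Int)), Dom_hypo_check_dir row col dir_x dir_y me board → Pre_hypo_check_dir row col dir_x dir_y me board → Spec_hypo_check_dir row col dir_x dir_y me board (hypo_check_dir row col dir_x dir_y me board)

-- ===== LEMMAS AND PROOFS =====

-- the fused scan of B equals A's scan applied to A's pre-built sequence, for any start
-- index and count (induction on the remaining steps k)
theorem pvScan_eq (me row col dir_x dir_y : Int) (board : List (Int × Int × Int)) :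
    ∀ (k : Nat) (i count : Int),
      pvScanA me (pvSeqA row col dir_x dir_y board k i) count =
        pvScanB (if me = 1 then 2 else 1) (if me = 1 then 1 else 2)
          row col dir_x dir_y board k i count := by
  intro k
  induction k with
  | zero => intro i count; simp [pvSeqA, pvScanB, pvScanA]
  | succ k ih =>
    intro i count
    by_cases hob : row + dir_y * i < 0 ∨ row + dir_y * i > 7 ∨
        col + dir_x * i < 0 ∨ col + dir_x * i > 7
    · simp [pvSeqA, pvScanB, pvScanA, hob]
    · by_cases hme : me = 1 <;>
        simp [pvSeqA, pvScanB, pvScanA, hob, hme, ih] <;>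
        split_ifs <;> simp_all

-- ===== VERDICT (by name: the statement is the Claim_ definition above) =====
theorem hypo_check_dir_spec : Claim_equal_hypo_check_dir := by
  intro row col dir_x dir_y me board _ _
  unfold Spec_hypo_check_dir hypo_check_dir hypo_check_dir_alt
  simp only [pvScan_eq]

theorem pv_witness_ok :
    Dom_hypo_check_dir (pvWitness_hypo_check_dir.1) (pvWitness_hypo_check_dir.2.1) (pvWitness_hypo_check_dir.2.2.1) (pvWitness_hypo_check_dir.2.2.2.1) (pvWitness_hypo_check_dir.2.2.2.2.1) (pvWitness_hypo_check_dir.2.2.2.2.2) ∧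
    Pre_hypo_check_dir (pvWitness_hypo_check_dir.1) (pvWitness_hypo_check_dir.2.1) (pvWitness_hypo_check_dir.2.2.1) (pvWitness_hypo_check_dir.2.2.2.1) (pvWitness_hypo_check_dir.2.2.2.2.1) (pvWitness_hypo_check_dir.2.2.2.2.2) := by
  decide
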